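-- pv_equiv track=rewrite | github.com/iamrishap/PythonBits | InterviewBits/dp/queen-attack.py | queenAttack
-- ===== SOURCE A (Python) =====
-- from collections import defaultdict
--
-- def queenAttack(A):
--     n, m = len(A), len(A[0])
--     res = [[0] * m for _ in range(n)]
--
--     hasTop = [0] * m
--     hasDiag = defaultdict(int)
--     hasRdiag = defaultdict(int)
--     for i in range(n):
--         hasLeft = 0
--         for j in range(m):
--             res[i][j] += hasLeft + hasTop[j] + hasDiag[j - i] + hasRdiag[j + i]
--             if A[i][j] == '1':
--                 hasLeft = 1
--                 hasTop[j] = 1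
--                 hasDiag[j - i] = 1
--                 hasRdiag[j + i] = 1
--
--     hasBottom = [0] * m
--     hasDiag = defaultdict(int)
--     hasRdiag = defaultdict(int)
--     for i in range(n - 1, -1, -1):
--         hasRight = 0
--         for j in range(m - 1, -1, -1):
--             res[i][j] += hasRight + hasBottom[j] + hasDiag[j - i] + hasRdiag[j + i]
--             if A[i][j] == '1':
--                 hasRight = 1
--                 hasBottom[j] = 1
--                 hasDiag[j - i] = 1
--                 hasRdiag[j + i] = 1
--
--     return res
-- ===== SOURCE B (Python) =====
-- DIRS = [(-1, -1), (-1, 0), (-1, 1), (0, -1), (0, 1), (1, -1), (1, 0), (1, 1)]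
--
--
-- def _seen(A, n, m, x, y, dx, dy):
--     # walk outward from (x, y) in direction (dx, dy); True iff a '1' is met in bounds
--     while 0 <= x < n and 0 <= y < m:
--         if A[x][y] == '1':
--             return True
--         x += dx
--         y += dy
--     return False
--
--
-- def queenAttack(A):
--     n, m = len(A), len(A[0])
--     res = []
--     for i in range(n):
--         row = []
--         for j in range(m):
--             c = 0
--             for dx, dy in DIRS:
--                 if _seen(A, n, m, i + dx, j + dy, dx, dy):
--                     c += 1
--             row.append(c)
--         res.append(row)
--     return res
-- ===== Notes on version B (the rewrite author's own statement) =====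
-- stated objective: simpler
-- what changed: A makes two opposite-direction sweeps over the grid maintaining four rolling prefix/suffix accumulators (row flag, column array, two diagonal dicts); B instead walks outward from each cell along the 8 direction vectors and counts the directions in which a queen is met, with no shared state between cells (plainer per-cell logic, at the cost of re-scanning rays).
import Mathlib
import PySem

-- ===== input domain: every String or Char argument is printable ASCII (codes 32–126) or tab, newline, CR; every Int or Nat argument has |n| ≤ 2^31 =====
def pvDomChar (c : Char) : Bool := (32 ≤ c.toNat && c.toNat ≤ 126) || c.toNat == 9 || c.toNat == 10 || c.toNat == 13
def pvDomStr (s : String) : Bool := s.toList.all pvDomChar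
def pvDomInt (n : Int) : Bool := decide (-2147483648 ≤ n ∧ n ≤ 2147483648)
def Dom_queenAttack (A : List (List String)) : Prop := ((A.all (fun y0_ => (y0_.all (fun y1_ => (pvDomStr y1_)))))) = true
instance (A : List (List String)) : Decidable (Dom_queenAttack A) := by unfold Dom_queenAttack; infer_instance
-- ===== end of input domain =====

-- B replaces A's four rolling prefix/suffix accumulators (two passes) by a direct
-- 8-direction ray walk from each cell; objective: simpler per-cell logic (not faster).

-- A[x][y] as a total lookup (in range on all admitted inputs)
def pvCell (A : List (List String)) (x y : Int) : String :=
  PySem.List.pyGetD (PySem.List.pyGetD A x []) y ""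

-- ===== PORT A =====
structure PvStA where
  res : List (List Int)
  top : List Int
  hd : PySem.Dict Int Int
  hr : PySem.Dict Int Int
  hl : Int

-- res[i][j] += v
def pvBump (res : List (List Int)) (i j v : Int) : List (List Int) :=
  PySem.List.pySetD res i
    (PySem.List.pySetD (PySem.List.pyGetD res i []) j
      (PySem.List.pyGetD (PySem.List.pyGetD res i []) j 0 + v))

-- the (identical) loop body of A's two passes
def pvStepA (A : List (List String)) (i : Int) (s : PvStA) (j : Int) : PvStA :=
  let v := s.hl + PySem.List.pyGetD s.top j 0 + s.hd.getD (j - i) 0 + s.hr.getD (j + i) 0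
  let res := pvBump s.res i j v
  if pvCell A i j == "1" then
    ⟨res, PySem.List.pySetD s.top j 1, s.hd.insert (j - i) 1, s.hr.insert (j + i) 1, 1⟩
  else ⟨res, s.top, s.hd, s.hr, s.hl⟩

-- one pass of A: for i in rows: hasLeft = 0; for j in cols: body
def pvPassA (A : List (List String)) (rows cols : List Int) (st : PvStA) : PvStA :=
  rows.foldl (fun st i => cols.foldl (pvStepA A i) ⟨st.res, st.top, st.hd, st.hr, 0⟩) st

def queenAttack (A : List (List String)) : List (List Int) :=
  let n : Int := A.length
  let m : Int := (PySem.List.pyGetD A 0 []).length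
  let res0 := (PySem.List.pyRange 0 n 1).map (fun _ => (PySem.List.pyRange 0 m 1).map (fun _ => (0 : Int)))
  let top0 := (PySem.List.pyRange 0 m 1).map (fun _ => (0 : Int))
  let s1 := pvPassA A (PySem.List.pyRange 0 n 1) (PySem.List.pyRange 0 m 1)
      ⟨res0, top0, PySem.Dict.empty, PySem.Dict.empty, 0⟩
  let s2 := pvPassA A (PySem.List.pyRange (n - 1) (-1) (-1)) (PySem.List.pyRange (m - 1) (-1) (-1))
      ⟨s1.res, top0, PySem.Dict.empty, PySem.Dict.empty, 0⟩
  s2.res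

-- ===== PORT B =====
def pvDirs : List (Int × Int) :=
  [(-1, -1), (-1, 0), (-1, 1), (0, -1), (0, 1), (1, -1), (1, 0), (1, 1)]

-- Source B's `_seen` while-loop; the walk leaves the n×m board after at most n+m steps,
-- so fuel (n+m).toNat makes the recursion identical to the Python loop
def pvSeen (A : List (List String)) (n m x y dx dy : Int) : Nat → Bool
  | 0 => false
  | fuel + 1 =>
    if 0 ≤ x ∧ x < n ∧ 0 ≤ y ∧ y < m then
      if pvCell A x y == "1" then true
      else pvSeen A n m (x + dx) (y + dy) dx dy fuel
    else false

def queenAttack_alt (A : List (List String)) : List (List Int) :=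
  let n : Int := A.length
  let m : Int := (PySem.List.pyGetD A 0 []).length
  (PySem.List.pyRange 0 n 1).map (fun i =>
    (PySem.List.pyRange 0 m 1).map (fun j =>
      pvDirs.foldl (fun c d =>
        if pvSeen A n m (i + d.1) (j + d.2) d.1 d.2 (n + m).toNat then c + 1 else c) 0))

-- ===== PRECONDITION & SPEC =====
-- Pre_ excludes exactly the inputs on which Python A raises IndexError: the empty
-- list (len(A[0])) and ragged inputs whose later rows are shorter than row 0.
def Pre_queenAttack (A : List (List String)) : Prop :=
  A ≠ [] ∧ ∀ row ∈ A, A.headI.length ≤ row.length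
instance (A : List (List String)) : Decidable (Pre_queenAttack A) := by
  unfold Pre_queenAttack; infer_instance
def pvWitness_queenAttack : List (List String) := [["1", "0"], ["0", "0"]]

def Spec_queenAttack (A : List (List String)) (out : List (List Int)) : Prop := out = queenAttack_alt A
instance (A : List (List String)) (out : List (List Int)) : Decidable (Spec_queenAttack A out) := by unfold Spec_queenAttack; infer_instance

-- ===== CLAIM (what is proved, stated in full; the proofs are below) =====
def Claim_equal_queenAttack : Prop := ∀ (A : List (List String)), Dom_queenAttack A → Pre_queenAttack A → Spec_queenAttack A (queenAttack A)

-- ===== LEMMAS AND PROOFS =====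

-- matrix read with Nat indices (defaults only hit out of range)
def pvGetM (res : List (List Int)) (x y : Nat) : Int := (res.getD x []).getD y 0

def pvOcc (A : List (List String)) (x y : Int) : Bool := pvCell A x y == "1"

theorem pvGetD_set {α : Type} (xs : List α) (a b : Nat) (v d : α) :
    (xs.set a v).getD b d = if a = b ∧ a < xs.length then v else xs.getD b d := by
  simp only [List.getD_eq_getElem?_getD, List.getElem?_set]
  split_ifs with h1 h2 h3 h4 <;> simp_all <;> omega

theorem pvGetD_zero (l : List Int) (h : ∀ v ∈ l, v = 0) (k : Nat) : l.getD k 0 = 0 := by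
  simp only [List.getD_eq_getElem?_getD]
  cases hk : l[k]? with
  | none => rfl
  | some v => exact h v (List.mem_of_getElem? hk)

theorem pvPyGetD_nonneg {α : Type} (xs : List α) (i : Int) (d : α) (h : 0 ≤ i) :
    PySem.List.pyGetD xs i d = xs.getD i.toNat d := by
  rw [PySem.List.pyGetD_of_nonneg (d := d) (xs := xs) h, List.getD_eq_getElem?_getD]

theorem pvBump_char (res : List (List Int)) (i j v : Int) (Hi : 0 ≤ i) (Hj : 0 ≤ j)
    (Hri : i.toNat < res.length) (Hrj : j.toNat < (res.getD i.toNat []).length) :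
    (pvBump res i j v).length = res.length
    ∧ (∀ x : Nat, ((pvBump res i j v).getD x []).length = (res.getD x []).length)
    ∧ (∀ x y : Nat, ¬(x = i.toNat ∧ y = j.toNat) → pvGetM (pvBump res i j v) x y = pvGetM res x y)
    ∧ pvGetM (pvBump res i j v) i.toNat j.toNat = pvGetM res i.toNat j.toNat + v := by
  unfold pvBump
  rw [pvPyGetD_nonneg (h := Hi), pvPyGetD_nonneg (h := Hj),
    PySem.List.pySetD_of_nonneg _ _ Hj, PySem.List.pySetD_of_nonneg _ _ Hi]
  refine ⟨by simp, ?_, ?_, ?_⟩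
  · intro x
    rw [pvGetD_set]
    split_ifs with h
    · rw [← h.1]; simp
    · rfl
  · intro x y hxy
    unfold pvGetM
    rw [pvGetD_set]
    split_ifs with h
    · rw [← h.1] at hxy ⊢
      rw [pvGetD_set]
      split_ifs with h2
      · exact absurd ⟨rfl, h2.1.symm⟩ hxy
      · rfl
    · rfl
  · unfold pvGetM
    rw [pvGetD_set, if_pos ⟨rfl, Hri⟩, pvGetD_set, if_pos ⟨rfl, Hrj⟩]

-- characterization of one execution of the loop body at column j of row i
theorem pvStep_char (A : List (List String)) (i j : Int) (s : PvStA)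
    (Hi : 0 ≤ i) (Hj : 0 ≤ j)
    (Hri : i.toNat < s.res.length)
    (Hrj : j.toNat < (s.res.getD i.toNat []).length)
    (Htj : j.toNat < s.top.length) :
    (pvStepA A i s j).res.length = s.res.length
    ∧ (∀ x : Nat, ((pvStepA A i s j).res.getD x []).length = (s.res.getD x []).length)
    ∧ (pvStepA A i s j).top.length = s.top.length
    ∧ (∀ y : Int, 0 ≤ y → y.toNat < s.top.length →
        PySem.List.pyGetD (pvStepA A i s j).top y 0 =
          if y = j ∧ pvOcc A i j = true then 1 else PySem.List.pyGetD s.top y 0)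
    ∧ (∀ d : Int, (pvStepA A i s j).hd.getD d 0 =
        if d = j - i ∧ pvOcc A i j = true then 1 else s.hd.getD d 0)
    ∧ (∀ d : Int, (pvStepA A i s j).hr.getD d 0 =
        if d = j + i ∧ pvOcc A i j = true then 1 else s.hr.getD d 0)
    ∧ (pvStepA A i s j).hl = (if pvOcc A i j = true then 1 else s.hl)
    ∧ (∀ x y : Nat, ¬(x = i.toNat ∧ y = j.toNat) →
        pvGetM (pvStepA A i s j).res x y = pvGetM s.res x y)
    ∧ pvGetM (pvStepA A i s j).res i.toNat j.toNat =
        pvGetM s.res i.toNat j.toNat +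
          (s.hl + PySem.List.pyGetD s.top j 0 + s.hd.getD (j - i) 0 + s.hr.getD (j + i) 0) := by
  obtain ⟨B1, B2, B3, B4⟩ := pvBump_char s.res i j
    (s.hl + PySem.List.pyGetD s.top j 0 + s.hd.getD (j - i) 0 + s.hr.getD (j + i) 0)
    Hi Hj Hri Hrj
  by_cases hocc : (pvCell A i j == "1") = true
  · have hocc' : pvOcc A i j = true := hocc
    have hs : pvStepA A i s j = ⟨pvBump s.res i j
        (s.hl + PySem.List.pyGetD s.top j 0 + s.hd.getD (j - i) 0 + s.hr.getD (j + i) 0),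
        PySem.List.pySetD s.top j 1, s.hd.insert (j - i) 1, s.hr.insert (j + i) 1, 1⟩ := by
      simp [pvStepA, hocc]
    rw [hs]
    refine ⟨B1, B2, by simp [PySem.List.pySetD_of_nonneg _ _ Hj], ?_, ?_, ?_, by simp [hocc'], B3, B4⟩
    · intro y hy hylen
      rw [PySem.List.pySetD_of_nonneg _ _ Hj, pvPyGetD_nonneg (h := hy), pvGetD_set]
      have hiff : (j.toNat = y.toNat ∧ j.toNat < s.top.length) ↔ (y = j ∧ pvOcc A i j = true) := by
        constructor
        · intro h; exact ⟨by omega, hocc'⟩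
        · intro h; exact ⟨by omega, Htj⟩
      rw [if_congr hiff rfl rfl, pvPyGetD_nonneg (h := hy)]
    · intro d
      rw [show (⟨_, _, s.hd.insert (j - i) 1, _, _⟩ : PvStA).hd = s.hd.insert (j - i) 1 from rfl,
        PySem.Dict.getD_insert]
      simp [hocc']
    · intro d
      rw [show (⟨_, _, _, s.hr.insert (j + i) 1, _⟩ : PvStA).hr = s.hr.insert (j + i) 1 from rfl,
        PySem.Dict.getD_insert]
      simp [hocc']
  · have hocc' : pvOcc A i j = false := by simpa [pvOcc] using hocc
    have hs : pvStepA A i s j = ⟨pvBump s.res i j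
        (s.hl + PySem.List.pyGetD s.top j 0 + s.hd.getD (j - i) 0 + s.hr.getD (j + i) 0),
        s.top, s.hd, s.hr, s.hl⟩ := by
      simp [pvStepA, hocc]
    rw [hs]
    exact ⟨B1, B2, rfl, fun y _ _ => by simp [hocc'], fun d => by simp [hocc'],
      fun d => by simp [hocc'], by simp [hocc'], B3, B4⟩

-- characterization of A's inner loop over an arbitrary duplicate-free column list
theorem pvRow_char (A : List (List String)) (i : Int) (rel : Int → Int → Bool)
    (cols : List Int) (s : PvStA)
    (Hpw : List.Pairwise (fun a b => rel a b = true) cols)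
    (Hasym : ∀ a b : Int, rel a b = true → rel b a = false)
    (Hnn : ∀ y ∈ cols, 0 ≤ y) (Hi : 0 ≤ i)
    (Hri : i.toNat < s.res.length)
    (Hrow : ∀ y ∈ cols, y.toNat < (s.res.getD i.toNat []).length)
    (Htop : ∀ y ∈ cols, y.toNat < s.top.length) :
    (cols.foldl (pvStepA A i) s).res.length = s.res.length
    ∧ (∀ x : Nat, ((cols.foldl (pvStepA A i) s).res.getD x []).length = (s.res.getD x []).length)
    ∧ (cols.foldl (pvStepA A i) s).top.length = s.top.length
    ∧ (∀ y : Int, 0 ≤ y → y.toNat < s.top.length →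
        PySem.List.pyGetD (cols.foldl (pvStepA A i) s).top y 0 =
          if y ∈ cols ∧ pvOcc A i y = true then 1 else PySem.List.pyGetD s.top y 0)
    ∧ (∀ d : Int, (cols.foldl (pvStepA A i) s).hd.getD d 0 =
        if (d + i) ∈ cols ∧ pvOcc A i (d + i) = true then 1 else s.hd.getD d 0)
    ∧ (∀ d : Int, (cols.foldl (pvStepA A i) s).hr.getD d 0 =
        if (d - i) ∈ cols ∧ pvOcc A i (d - i) = true then 1 else s.hr.getD d 0)
    ∧ (cols.foldl (pvStepA A i) s).hl =
        (if cols.any (fun y => pvOcc A i y) = true then 1 else s.hl)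
    ∧ (∀ x y : Nat, ¬((x : Int) = i ∧ (y : Int) ∈ cols) →
        pvGetM (cols.foldl (pvStepA A i) s).res x y = pvGetM s.res x y)
    ∧ (∀ y ∈ cols, pvGetM (cols.foldl (pvStepA A i) s).res i.toNat y.toNat =
        pvGetM s.res i.toNat y.toNat +
          ((if cols.any (fun y' => rel y' y && pvOcc A i y') = true then 1 else s.hl)
            + PySem.List.pyGetD s.top y 0 + s.hd.getD (y - i) 0 + s.hr.getD (y + i) 0)) := by
  revert Hpw Hnn Hri Hrow Htop
  induction cols generalizing s with
  | nil => intro _ _ _ _ _; simp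
  | cons c rest ih =>
    intro Hpw Hnn Hri Hrow Htop
    obtain ⟨hcr, Hpw'⟩ := List.pairwise_cons.mp Hpw
    have hc0 : 0 ≤ c := Hnn c (List.mem_cons_self ..)
    have hcnotmem : c ∉ rest := fun h => by
      have h1 := hcr c h
      have h2 := Hasym c c h1
      rw [h1] at h2
      exact absurd h2 (by simp)
    obtain ⟨S1, S2, S3, S4, S5, S6, S7, S8, S9⟩ :=
      pvStep_char A i c s Hi hc0 Hri (Hrow c (List.mem_cons_self ..)) (Htop c (List.mem_cons_self ..))
    obtain ⟨I1, I2, I3, I4, I5, I6, I7, I8, I9⟩ :=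
      ih (pvStepA A i s c) Hpw' (fun y hy => Hnn y (List.mem_cons_of_mem _ hy))
        (S1 ▸ Hri)
        (fun y hy => by rw [S2]; exact Hrow y (List.mem_cons_of_mem _ hy))
        (fun y hy => by rw [S3]; exact Htop y (List.mem_cons_of_mem _ hy))
    simp only [List.foldl_cons]
    have hrelcc : rel c c = false := by
      by_cases h : rel c c = true
      · exact Hasym c c h
      · simpa using h
    refine ⟨I1.trans S1, fun x => (I2 x).trans (S2 x), I3.trans S3, ?_, ?_, ?_, ?_, ?_, ?_⟩
    · -- top
      intro y hy hylen
      rw [I4 y hy (S3 ▸ hylen), S4 y hy hylen]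
      by_cases h1 : y ∈ rest ∧ pvOcc A i y = true
      · simp [h1, h1.1, List.mem_cons]
      · rw [if_neg h1]
        by_cases h2 : y = c
        · subst h2
          by_cases hoy : pvOcc A i y = true <;> simp [hoy, h1]
        · rw [if_neg (by simp [h2]), if_neg (by
            rintro ⟨hmem, hoy⟩
            rcases List.mem_cons.mp hmem with h | h
            · exact h2 h
            · exact h1 ⟨h, hoy⟩)]
    · -- hd
      intro d
      rw [I5 d, S5 d]
      by_cases h1 : (d + i) ∈ rest ∧ pvOcc A i (d + i) = true
      · simp [h1, h1.1, List.mem_cons]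
      · rw [if_neg h1]
        by_cases h2 : d + i = c
        · have h2' : d = c - i := by omega
          have h2'' : pvOcc A i (d + i) = pvOcc A i c := by rw [h2]
          by_cases hoy : pvOcc A i c = true <;>
            simp [h2, h2', h2'', hoy, h1, List.mem_cons]
        · rw [if_neg (by rintro ⟨h, _⟩; exact h2 (by omega)), if_neg (by
            rintro ⟨hmem, hoy⟩
            rcases List.mem_cons.mp hmem with h | h
            · exact h2 h
            · exact h1 ⟨h, hoy⟩)]
    · -- hr
      intro d
      rw [I6 d, S6 d]
      by_cases h1 : (d - i) ∈ rest ∧ pvOcc A i (d - i) = true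
      · simp [h1, h1.1, List.mem_cons]
      · rw [if_neg h1]
        by_cases h2 : d - i = c
        · have h2' : d = c + i := by omega
          have h2'' : pvOcc A i (d - i) = pvOcc A i c := by rw [h2]
          by_cases hoy : pvOcc A i c = true <;>
            simp [h2, h2', h2'', hoy, h1, List.mem_cons]
        · rw [if_neg (by rintro ⟨h, _⟩; exact h2 (by omega)), if_neg (by
            rintro ⟨hmem, hoy⟩
            rcases List.mem_cons.mp hmem with h | h
            · exact h2 h
            · exact h1 ⟨h, hoy⟩)]
    · -- hl
      rw [I7, S7, List.any_cons]
      by_cases h1 : rest.any (fun y => pvOcc A i y) = true <;>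
        by_cases h2 : pvOcc A i c = true <;> simp [h1, h2]
    · -- unchanged entries
      intro x y hxy
      rw [I8 x y (fun h => hxy ⟨h.1, List.mem_cons_of_mem _ h.2⟩),
        S8 x y (fun h => hxy ⟨by omega, by
          have : (y : Int) = c := by omega
          rw [this]; exact List.mem_cons_self ..⟩)]
    · -- the value written at row i
      intro y hy
      rcases List.mem_cons.mp hy with hyc | hyr
      · subst hyc
        have hnotrest : ((y.toNat : Int)) ∉ rest := by
          rwa [Int.toNat_of_nonneg hc0]
        rw [I8 i.toNat y.toNat (by
          rintro ⟨_, hmem⟩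
          exact hnotrest hmem), S9]
        have hany : (y :: rest).any (fun y' => rel y' y && pvOcc A i y') = false := by
          simp only [List.any_cons, hrelcc, Bool.false_and, Bool.false_or, List.any_eq_false]
          intro y' hy'
          simp [Hasym y y' (hcr y' hy')]
        rw [hany]
        simp
      · have hy0 : 0 ≤ y := Hnn y hy
        have hyc : y ≠ c := fun h => hcnotmem (h ▸ hyr)
        have hTop1 : PySem.List.pyGetD (pvStepA A i s c).top y 0 = PySem.List.pyGetD s.top y 0 := by
          rw [S4 y hy0 (Htop y hy)]; exact if_neg (by rintro ⟨h, _⟩; exact hyc h)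
        have hHd1 : (pvStepA A i s c).hd.getD (y - i) 0 = s.hd.getD (y - i) 0 := by
          rw [S5 (y - i)]; exact if_neg (by rintro ⟨h, _⟩; exact hyc (by omega))
        have hHr1 : (pvStepA A i s c).hr.getD (y + i) 0 = s.hr.getD (y + i) 0 := by
          rw [S6 (y + i)]; exact if_neg (by rintro ⟨h, _⟩; exact hyc (by omega))
        have hG1 : pvGetM (pvStepA A i s c).res i.toNat y.toNat = pvGetM s.res i.toNat y.toNat :=
          S8 i.toNat y.toNat (by rintro ⟨_, h2⟩; exact hyc (by omega))
        have hterm : (if rest.any (fun y' => rel y' y && pvOcc A i y') = true then (1 : Int)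
            else if pvOcc A i c = true then 1 else s.hl) =
            (if (c :: rest).any (fun y' => rel y' y && pvOcc A i y') = true then 1 else s.hl) := by
          rw [List.any_cons, hcr y hyr]
          by_cases h1 : rest.any (fun y' => rel y' y && pvOcc A i y') = true <;>
            by_cases h2 : pvOcc A i c = true <;> simp [h1, h2]
        rw [I9 y hyr, hG1, hTop1, hHd1, hHr1, S7, hterm]

-- characterization of one whole pass of A
theorem pvPass_char (A : List (List String)) (rrel crel : Int → Int → Bool)
    (rows cols : List Int) (st : PvStA)
    (HpwR : List.Pairwise (fun a b => rrel a b = true) rows)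
    (HasymR : ∀ a b : Int, rrel a b = true → rrel b a = false)
    (HnnR : ∀ x ∈ rows, 0 ≤ x)
    (Hpw : List.Pairwise (fun a b => crel a b = true) cols)
    (Hasym : ∀ a b : Int, crel a b = true → crel b a = false)
    (Hnn : ∀ y ∈ cols, 0 ≤ y)
    (HdimR : ∀ x ∈ rows, x.toNat < st.res.length)
    (HdimC : ∀ x ∈ rows, ∀ y ∈ cols, y.toNat < (st.res.getD x.toNat []).length)
    (Htop : ∀ y ∈ cols, y.toNat < st.top.length) :
    (pvPassA A rows cols st).res.length = st.res.length
    ∧ (∀ x : Nat, ((pvPassA A rows cols st).res.getD x []).length = (st.res.getD x []).length)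
    ∧ (∀ x y : Nat, ¬((x : Int) ∈ rows ∧ (y : Int) ∈ cols) →
        pvGetM (pvPassA A rows cols st).res x y = pvGetM st.res x y)
    ∧ (∀ x ∈ rows, ∀ y ∈ cols,
        pvGetM (pvPassA A rows cols st).res x.toNat y.toNat =
          pvGetM st.res x.toNat y.toNat +
            ((if cols.any (fun y' => crel y' y && pvOcc A x y') = true then 1 else 0)
              + (if rows.any (fun x' => rrel x' x && pvOcc A x' y) = true then 1
                  else PySem.List.pyGetD st.top y 0)
              + (if rows.any (fun x' => rrel x' x && decide ((y - x + x') ∈ cols) && pvOcc A x' (y - x + x')) = true then 1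
                  else st.hd.getD (y - x) 0)
              + (if rows.any (fun x' => rrel x' x && decide ((y + x - x') ∈ cols) && pvOcc A x' (y + x - x')) = true then 1
                  else st.hr.getD (y + x) 0)))
    ∧ (pvPassA A rows cols st).top.length = st.top.length
    ∧ (∀ y : Int, 0 ≤ y → y.toNat < st.top.length →
        PySem.List.pyGetD (pvPassA A rows cols st).top y 0 =
          if y ∈ cols ∧ rows.any (fun x => pvOcc A x y) = true then 1
          else PySem.List.pyGetD st.top y 0)
    ∧ (∀ d : Int, (pvPassA A rows cols st).hd.getD d 0 =
        if rows.any (fun x => decide ((d + x) ∈ cols) && pvOcc A x (d + x)) = true then 1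
        else st.hd.getD d 0)
    ∧ (∀ d : Int, (pvPassA A rows cols st).hr.getD d 0 =
        if rows.any (fun x => decide ((d - x) ∈ cols) && pvOcc A x (d - x)) = true then 1
        else st.hr.getD d 0) := by
  revert HpwR HnnR HdimR HdimC Htop
  induction rows generalizing st with
  | nil => intro _ _ _ _ _; simp [pvPassA]
  | cons r rest ih =>
    intro HpwR HnnR HdimR HdimC Htop
    obtain ⟨hrr, HpwR'⟩ := List.pairwise_cons.mp HpwR
    have hr0 : 0 ≤ r := HnnR r (List.mem_cons_self ..)
    have hrrelrr : rrel r r = false := by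
      by_cases h : rrel r r = true
      · exact HasymR r r h
      · simpa using h
    have hrnotmem : r ∉ rest := fun h => by
      have h1 := hrr r h
      have h2 := HasymR r r h1
      rw [h1] at h2
      exact absurd h2 (by simp)
    obtain ⟨R1, R2, R3, R4, R5, R6, R7, R8, R9⟩ :=
      pvRow_char A r crel cols ⟨st.res, st.top, st.hd, st.hr, 0⟩ Hpw Hasym Hnn hr0
        (HdimR r (List.mem_cons_self ..)) (HdimC r (List.mem_cons_self ..)) Htop
    have hfold : pvPassA A (r :: rest) cols st =
        pvPassA A rest cols (cols.foldl (pvStepA A r) ⟨st.res, st.top, st.hd, st.hr, 0⟩) := rfl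
    obtain ⟨I1, I2, I3, I4, I5, I6, I7, I8⟩ :=
      ih (cols.foldl (pvStepA A r) ⟨st.res, st.top, st.hd, st.hr, 0⟩) HpwR'
        (fun x hx => HnnR x (List.mem_cons_of_mem _ hx))
        (fun x hx => by rw [R1]; exact HdimR x (List.mem_cons_of_mem _ hx))
        (fun x hx y hy => by rw [R2]; exact HdimC x (List.mem_cons_of_mem _ hx) y hy)
        (fun y hy => by rw [R3]; exact Htop y hy)
    rw [hfold]
    refine ⟨I1.trans R1, fun x => (I2 x).trans (R2 x), ?_, ?_, I5.trans R3, ?_, ?_, ?_⟩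
    · -- unchanged entries
      intro x y hxy
      rw [I3 x y (fun h => hxy ⟨List.mem_cons_of_mem _ h.1, h.2⟩),
        R8 x y (fun h => hxy ⟨h.1 ▸ List.mem_cons_self .., h.2⟩)]
    · -- the per-cell value
      intro x hx y hy
      have hy0 : 0 ≤ y := Hnn y hy
      rcases List.mem_cons.mp hx with hxr | hxr
      · subst hxr
        have hanyT : (x :: rest).any (fun x' => rrel x' x && pvOcc A x' y) = false := by
          simp only [List.any_eq_false]
          intro x' hx'
          rcases List.mem_cons.mp hx' with h | h
          · subst h; simp [hrrelrr]
          · simp [HasymR x x' (hrr x' h)]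
        have hanyD : (x :: rest).any (fun x' => rrel x' x && decide ((y - x + x') ∈ cols) && pvOcc A x' (y - x + x')) = false := by
          simp only [List.any_eq_false]
          intro x' hx'
          rcases List.mem_cons.mp hx' with h | h
          · subst h; simp [hrrelrr]
          · simp [HasymR x x' (hrr x' h)]
        have hanyR : (x :: rest).any (fun x' => rrel x' x && decide ((y + x - x') ∈ cols) && pvOcc A x' (y + x - x')) = false := by
          simp only [List.any_eq_false]
          intro x' hx'
          rcases List.mem_cons.mp hx' with h | h
          · subst h; simp [hrrelrr]
          · simp [HasymR x x' (hrr x' h)]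
        have hnr : ((x.toNat : Int)) ∉ rest := by rwa [Int.toNat_of_nonneg hr0]
        rw [I3 x.toNat y.toNat (by rintro ⟨h1, _⟩; exact hnr h1), R9 y hy, hanyT, hanyD, hanyR]
        simp
      · have hx0 : 0 ≤ x := HnnR x (List.mem_cons_of_mem _ hxr)
        have hxner : x ≠ r := fun h => hrnotmem (h ▸ hxr)
        have hG1 : pvGetM (cols.foldl (pvStepA A r) ⟨st.res, st.top, st.hd, st.hr, 0⟩).res x.toNat y.toNat
            = pvGetM st.res x.toNat y.toNat :=
          R8 x.toNat y.toNat (by rintro ⟨h1, _⟩; exact hxner (by omega))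
        have hTop1 : (if rest.any (fun x' => rrel x' x && pvOcc A x' y) = true then (1 : Int)
              else PySem.List.pyGetD (cols.foldl (pvStepA A r) ⟨st.res, st.top, st.hd, st.hr, 0⟩).top y 0)
            = (if (r :: rest).any (fun x' => rrel x' x && pvOcc A x' y) = true then 1
              else PySem.List.pyGetD st.top y 0) := by
          rw [R4 y hy0 (Htop y hy), List.any_cons, hrr x hxr]
          by_cases h1 : rest.any (fun x' => rrel x' x && pvOcc A x' y) = true <;>
            by_cases h3 : pvOcc A r y = true <;> simp [h1, h3, hy]
        have hHd1 : (if rest.any (fun x' => rrel x' x && decide ((y - x + x') ∈ cols) && pvOcc A x' (y - x + x')) = true then (1 : Int)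
              else (cols.foldl (pvStepA A r) ⟨st.res, st.top, st.hd, st.hr, 0⟩).hd.getD (y - x) 0)
            = (if (r :: rest).any (fun x' => rrel x' x && decide ((y - x + x') ∈ cols) && pvOcc A x' (y - x + x')) = true then 1
              else st.hd.getD (y - x) 0) := by
          rw [R5 (y - x), List.any_cons, hrr x hxr]
          by_cases h1 : rest.any (fun x' => rrel x' x && decide ((y - x + x') ∈ cols) && pvOcc A x' (y - x + x')) = true <;>
            by_cases h2 : (y - x + r) ∈ cols <;>
              by_cases h3 : pvOcc A r (y - x + r) = true <;> simp [h1, h2, h3]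
        have hHr1 : (if rest.any (fun x' => rrel x' x && decide ((y + x - x') ∈ cols) && pvOcc A x' (y + x - x')) = true then (1 : Int)
              else (cols.foldl (pvStepA A r) ⟨st.res, st.top, st.hd, st.hr, 0⟩).hr.getD (y + x) 0)
            = (if (r :: rest).any (fun x' => rrel x' x && decide ((y + x - x') ∈ cols) && pvOcc A x' (y + x - x')) = true then 1
              else st.hr.getD (y + x) 0) := by
          rw [R6 (y + x), List.any_cons, hrr x hxr]
          by_cases h1 : rest.any (fun x' => rrel x' x && decide ((y + x - x') ∈ cols) && pvOcc A x' (y + x - x')) = true <;>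
            by_cases h2 : (y + x - r) ∈ cols <;>
              by_cases h3 : pvOcc A r (y + x - r) = true <;> simp [h1, h2, h3]
        rw [I4 x hxr y hy, hG1, hTop1, hHd1, hHr1]
    · -- top
      intro y hy hylen
      rw [I6 y hy (R3 ▸ hylen), R4 y hy hylen, List.any_cons]
      by_cases hyc : y ∈ cols
      · by_cases h1 : rest.any (fun x => pvOcc A x y) = true <;>
          by_cases h2 : pvOcc A r y = true <;> simp [hyc, h1, h2]
      · simp [hyc]
    · -- hd
      intro d
      rw [I7 d, R5 d, List.any_cons]
      by_cases h1 : rest.any (fun x => decide ((d + x) ∈ cols) && pvOcc A x (d + x)) = true <;>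
        by_cases h2 : (d + r) ∈ cols <;>
          by_cases h3 : pvOcc A r (d + r) = true <;> simp [h1, h2, h3]
    · -- hr
      intro d
      rw [I8 d, R6 d, List.any_cons]
      by_cases h1 : rest.any (fun x => decide ((d - x) ∈ cols) && pvOcc A x (d - x)) = true <;>
        by_cases h2 : (d - r) ∈ cols <;>
          by_cases h3 : pvOcc A r (d - r) = true <;> simp [h1, h2, h3]

-- in-bounds positions along a ray from an in-bounds cell are downward closed
theorem pvRay_mono (n m i j dx dy s k : Int)
    (hdx : dx = -1 ∨ dx = 0 ∨ dx = 1) (hdy : dy = -1 ∨ dy = 0 ∨ dy = 1)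
    (hi : 0 ≤ i) (hin : i < n) (hj : 0 ≤ j) (hjm : j < m)
    (hs : 0 ≤ s) (hsk : s ≤ k)
    (hk : 0 ≤ i + k * dx ∧ i + k * dx < n ∧ 0 ≤ j + k * dy ∧ j + k * dy < m) :
    0 ≤ i + s * dx ∧ i + s * dx < n ∧ 0 ≤ j + s * dy ∧ j + s * dy < m := by
  rcases hdx with h | h | h <;> rcases hdy with h' | h' | h' <;> subst h h' <;> omega

-- the while-walk finds a queen iff some in-bounds cell strictly along the ray holds one
theorem pvSeen_gen (A : List (List String)) (n m i j dx dy : Int)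
    (hdx : dx = -1 ∨ dx = 0 ∨ dx = 1) (hdy : dy = -1 ∨ dy = 0 ∨ dy = 1)
    (hnz : ¬(dx = 0 ∧ dy = 0))
    (hi : 0 ≤ i) (hin : i < n) (hj : 0 ≤ j) (hjm : j < m) :
    ∀ (f : Nat) (t : Int), 1 ≤ t → n + m < t + (f : Int) →
      (pvSeen A n m (i + t * dx) (j + t * dy) dx dy f = true ↔
        ∃ k : Int, t ≤ k ∧ 0 ≤ i + k * dx ∧ i + k * dx < n ∧ 0 ≤ j + k * dy ∧ j + k * dy < m
          ∧ pvOcc A (i + k * dx) (j + k * dy) = true) := by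
  intro f
  induction f with
  | zero =>
    intro t ht hf
    simp only [pvSeen, Bool.false_eq_true, false_iff]
    rintro ⟨k, hk1, hk2, hk3, hk4, hk5, -⟩
    rcases hdx with h | h | h <;> rcases hdy with h' | h' | h' <;> subst h h' <;>
      first
        | exact hnz ⟨rfl, rfl⟩
        | (simp only [Nat.cast_zero] at hf; omega)
  | succ f ihf =>
    intro t ht hf
    by_cases hb : 0 ≤ i + t * dx ∧ i + t * dx < n ∧ 0 ≤ j + t * dy ∧ j + t * dy < m
    · by_cases hoc : (pvCell A (i + t * dx) (j + t * dy) == "1") = true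
      · simp only [pvSeen]
        rw [if_pos hb, if_pos hoc]
        simp only [true_iff]
        exact ⟨t, le_refl t, hb.1, hb.2.1, hb.2.2.1, hb.2.2.2, hoc⟩
      · have hocc' : pvOcc A (i + t * dx) (j + t * dy) = false := by
          simpa [pvOcc] using hoc
        have e1 : i + t * dx + dx = i + (t + 1) * dx := by ring
        have e2 : j + t * dy + dy = j + (t + 1) * dy := by ring
        simp only [pvSeen]
        rw [if_pos hb, if_neg hoc, e1, e2, ihf (t + 1) (by omega) (by push_cast at hf ⊢; omega)]
        constructor
        · rintro ⟨k, hk1, hk⟩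
          exact ⟨k, by omega, hk⟩
        · rintro ⟨k, hk1, hk2, hk3, hk4, hk5, hk6⟩
          refine ⟨k, ?_, hk2, hk3, hk4, hk5, hk6⟩
          rcases eq_or_lt_of_le hk1 with h | h
          · exfalso
            rw [← h] at hk6
            rw [hocc'] at hk6
            exact absurd hk6 (by simp)
          · omega
    · simp only [pvSeen]
      rw [if_neg hb]
      simp only [Bool.false_eq_true, false_iff]
      rintro ⟨k, hk1, hk2, hk3, hk4, hk5, -⟩
      exact hb (pvRay_mono n m i j dx dy t k hdx hdy hi hin hj hjm (by omega) hk1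
        ⟨hk2, hk3, hk4, hk5⟩)

theorem pvSeen_iff (A : List (List String)) (n m i j dx dy : Int)
    (hdx : dx = -1 ∨ dx = 0 ∨ dx = 1) (hdy : dy = -1 ∨ dy = 0 ∨ dy = 1)
    (hnz : ¬(dx = 0 ∧ dy = 0))
    (hi : 0 ≤ i) (hin : i < n) (hj : 0 ≤ j) (hjm : j < m) :
    (pvSeen A n m (i + dx) (j + dy) dx dy (n + m).toNat = true) ↔
      (∃ k : Int, 1 ≤ k ∧ 0 ≤ i + k * dx ∧ i + k * dx < n ∧ 0 ≤ j + k * dy ∧ j + k * dy < m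
        ∧ pvOcc A (i + k * dx) (j + k * dy) = true) := by
  have h := pvSeen_gen A n m i j dx dy hdx hdy hnz hi hin hj hjm (n + m).toNat 1
    (le_refl 1) (by omega)
  simpa using h

-- ===== VERDICT (by name: the statement is the Claim_ definition above) =====
theorem queenAttack_spec : Claim_equal_queenAttack := by
  intro A _hdom hpre
  unfold Spec_queenAttack
  obtain ⟨hne, hrowsge⟩ := hpre
  have hn1 : 1 ≤ (A.length : Int) := by
    cases A with
    | nil => exact absurd rfl hne
    | cons a as => simp
  -- n and m as they appear in both ports
  have hm0 : PySem.List.pyGetD A 0 [] = A.headI := by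
    cases A with
    | nil => exact absurd rfl hne
    | cons a as => rw [pvPyGetD_nonneg (h := le_refl 0)]; rfl
  set n : Int := (A.length : Int) with hn
  set m : Int := ((PySem.List.pyGetD A 0 []).length : Int) with hmdef
  have hm0le : 0 ≤ m := by positivity
  -- the index lists of the two passes
  set rows1 : List Int := PySem.List.pyRange 0 n 1 with hrows1
  set cols1 : List Int := PySem.List.pyRange 0 m 1 with hcols1
  set rows2 : List Int := PySem.List.pyRange (n - 1) (-1) (-1) with hrows2
  set cols2 : List Int := PySem.List.pyRange (m - 1) (-1) (-1) with hcols2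
  have hmem1r : ∀ x : Int, x ∈ rows1 ↔ 0 ≤ x ∧ x < n := by
    intro x; rw [hrows1, PySem.List.mem_pyRange_one]
  have hmem1c : ∀ y : Int, y ∈ cols1 ↔ 0 ≤ y ∧ y < m := by
    intro y; rw [hcols1, PySem.List.mem_pyRange_one]
  have hmem2r : ∀ x : Int, x ∈ rows2 ↔ 0 ≤ x ∧ x < n := by
    intro x; rw [hrows2, PySem.List.mem_pyRange_neg_one]; omega
  have hmem2c : ∀ y : Int, y ∈ cols2 ↔ 0 ≤ y ∧ y < m := by
    intro y; rw [hcols2, PySem.List.mem_pyRange_neg_one]; omega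
  have hpw1r : rows1.Pairwise (fun a b => decide (a < b) = true) :=
    (PySem.List.pairwise_lt_pyRange_one ..).imp (fun h => by simpa using h)
  have hpw1c : cols1.Pairwise (fun a b => decide (a < b) = true) :=
    (PySem.List.pairwise_lt_pyRange_one ..).imp (fun h => by simpa using h)
  have hpw2r : rows2.Pairwise (fun a b => decide (b < a) = true) := by
    rw [hrows2, PySem.List.pyRange_neg_one, List.pairwise_map]
    exact List.pairwise_lt_range.imp (fun h => by simp; omega)
  have hpw2c : cols2.Pairwise (fun a b => decide (b < a) = true) := by
    rw [hcols2, PySem.List.pyRange_neg_one, List.pairwise_map]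
    exact List.pairwise_lt_range.imp (fun h => by simp; omega)
  have hasym1 : ∀ a b : Int, decide (a < b) = true → decide (b < a) = false := by
    intro a b h; simp at h ⊢; omega
  have hasym2 : ∀ a b : Int, decide (b < a) = true → decide (a < b) = false := by
    intro a b h; simp at h ⊢; omega
  -- the zero matrix and zero row
  set row0 : List Int := (PySem.List.pyRange 0 m 1).map (fun _ => (0 : Int)) with hrow0
  set res0 : List (List Int) := (PySem.List.pyRange 0 n 1).map (fun _ => row0) with hres0
  have hres0len : res0.length = n.toNat := by
    rw [hres0]; simp [PySem.List.length_pyRange_one]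
  have hrow0len : row0.length = m.toNat := by
    rw [hrow0]; simp [PySem.List.length_pyRange_one]
  have hres0row : ∀ x : Nat, x < n.toNat → res0.getD x [] = row0 := by
    intro x hx
    rw [hres0, List.getD_eq_getElem _ _ (by simp [PySem.List.length_pyRange_one]; omega)]
    simp
  have hres00 : ∀ x y : Nat, pvGetM res0 x y = 0 := by
    intro x y
    unfold pvGetM
    apply pvGetD_zero
    intro v hv
    rcases Nat.lt_or_ge x n.toNat with hx | hx
    · rw [hres0row x hx, hrow0] at hv
      simp at hv
      tauto
    · rw [List.getD_eq_default _ _ (by omega : res0.length ≤ x)] at hv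
      simp at hv
  have htop00 : ∀ y : Int, 0 ≤ y → PySem.List.pyGetD row0 y 0 = 0 := by
    intro y hy
    rw [pvPyGetD_nonneg (h := hy)]
    apply pvGetD_zero
    intro v hv
    rw [hrow0] at hv
    simp at hv
    tauto
  -- first pass
  obtain ⟨P1, P2, P3, P4, P5, P6, P7, P8⟩ :=
    pvPass_char A (fun a b => decide (a < b)) (fun a b => decide (a < b)) rows1 cols1
      ⟨res0, row0, PySem.Dict.empty, PySem.Dict.empty, 0⟩
      hpw1r hasym1 (fun x hx => ((hmem1r x).mp hx).1)
      hpw1c hasym1 (fun y hy => ((hmem1c y).mp hy).1)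
      (fun x hx => by
        have := (hmem1r x).mp hx
        show x.toNat < res0.length
        rw [hres0len]; omega)
      (fun x hx y hy => by
        have h1 := (hmem1r x).mp hx
        have h2 := (hmem1c y).mp hy
        show y.toNat < (res0.getD x.toNat []).length
        rw [hres0row x.toNat (by omega), hrow0len]; omega)
      (fun y hy => by
        have := (hmem1c y).mp hy
        show y.toNat < row0.length
        rw [hrow0len]; omega)
  set s1 : PvStA := pvPassA A rows1 cols1 ⟨res0, row0, PySem.Dict.empty, PySem.Dict.empty, 0⟩
    with hs1
  -- second pass
  obtain ⟨Q1, Q2, Q3, Q4, Q5, Q6, Q7, Q8⟩ :=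
    pvPass_char A (fun a b => decide (b < a)) (fun a b => decide (b < a)) rows2 cols2
      ⟨s1.res, row0, PySem.Dict.empty, PySem.Dict.empty, 0⟩
      hpw2r hasym2 (fun x hx => ((hmem2r x).mp hx).1)
      hpw2c hasym2 (fun y hy => ((hmem2c y).mp hy).1)
      (fun x hx => by
        have := (hmem2r x).mp hx
        show x.toNat < s1.res.length
        rw [hs1, P1]; show x.toNat < res0.length; rw [hres0len]; omega)
      (fun x hx y hy => by
        have h1 := (hmem2r x).mp hx
        have h2 := (hmem2c y).mp hy
        show y.toNat < (s1.res.getD x.toNat []).length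
        rw [hs1, P2 x.toNat]
        show y.toNat < (res0.getD x.toNat []).length
        rw [hres0row x.toNat (by omega), hrow0len]; omega)
      (fun y hy => by
        have := (hmem2c y).mp hy
        show y.toNat < row0.length
        rw [hrow0len]; omega)
  set s2 : PvStA := pvPassA A rows2 cols2 ⟨s1.res, row0, PySem.Dict.empty, PySem.Dict.empty, 0⟩
    with hs2
  have hfinal : ∀ xi yi : Int, 0 ≤ xi → xi < n → 0 ≤ yi → yi < m →
      pvGetM s2.res xi.toNat yi.toNat =
        pvDirs.foldl (fun c d =>
          if pvSeen A n m (xi + d.1) (yi + d.2) d.1 d.2 (n + m).toNat = true then c + 1 else c) 0 := by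
    intro xi yi hxi0 hxin hyi0 hyim
    have hx1 : xi ∈ rows1 := (hmem1r xi).mpr ⟨hxi0, hxin⟩
    have hy1 : yi ∈ cols1 := (hmem1c yi).mpr ⟨hyi0, hyim⟩
    have hx2 : xi ∈ rows2 := (hmem2r xi).mpr ⟨hxi0, hxin⟩
    have hy2 : yi ∈ cols2 := (hmem2c yi).mpr ⟨hyi0, hyim⟩
    rw [hs2, Q4 xi hx2 yi hy2]
    have hQbase : pvGetM (⟨s1.res, row0, PySem.Dict.empty, PySem.Dict.empty, 0⟩ : PvStA).res xi.toNat yi.toNat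
        = pvGetM s1.res xi.toNat yi.toNat := rfl
    rw [hQbase, hs1, P4 xi hx1 yi hy1]
    have hPbase : pvGetM (⟨res0, row0, PySem.Dict.empty, PySem.Dict.empty, 0⟩ : PvStA).res xi.toNat yi.toNat
        = pvGetM res0 xi.toNat yi.toNat := rfl
    rw [hPbase, hres00]
    simp only [PySem.Dict.getD_empty, htop00 yi hyi0]
    -- direction (0, -1): left
    have hdL : cols1.any (fun y' => decide (y' < yi) && pvOcc A xi y')
        = pvSeen A n m (xi + 0) (yi + -1) 0 (-1) (n + m).toNat := by
      rw [Bool.eq_iff_iff, List.any_eq_true,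
        pvSeen_iff A n m xi yi 0 (-1) (by norm_num) (by norm_num) (by norm_num) hxi0 hxin hyi0 hyim]
      constructor
      · rintro ⟨y', hy', hpred⟩
        simp only [Bool.and_eq_true, decide_eq_true_eq] at hpred
        rw [hmem1c] at hy'
        refine ⟨yi - y', by omega, by omega, by omega, by omega, by omega, ?_⟩
        rw [show xi + (yi - y') * 0 = xi from by ring, show yi + (yi - y') * -1 = y' from by ring]
        exact hpred.2
      · rintro ⟨k, hk1, hk2, hk3, hk4, hk5, hocc⟩
        refine ⟨yi - k, (hmem1c _).mpr ⟨by omega, by omega⟩, ?_⟩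
        simp only [Bool.and_eq_true, decide_eq_true_eq]
        refine ⟨by omega, ?_⟩
        rw [show xi = xi + k * 0 from by ring, show yi - k = yi + k * -1 from by ring]
        exact hocc
    -- direction (-1, 0): up
    have hdU : rows1.any (fun x' => decide (x' < xi) && pvOcc A x' yi)
        = pvSeen A n m (xi + -1) (yi + 0) (-1) 0 (n + m).toNat := by
      rw [Bool.eq_iff_iff, List.any_eq_true,
        pvSeen_iff A n m xi yi (-1) 0 (by norm_num) (by norm_num) (by norm_num) hxi0 hxin hyi0 hyim]
      constructor
      · rintro ⟨x', hx', hpred⟩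
        simp only [Bool.and_eq_true, decide_eq_true_eq] at hpred
        rw [hmem1r] at hx'
        refine ⟨xi - x', by omega, by omega, by omega, by omega, by omega, ?_⟩
        rw [show xi + (xi - x') * -1 = x' from by ring, show yi + (xi - x') * 0 = yi from by ring]
        exact hpred.2
      · rintro ⟨k, hk1, hk2, hk3, hk4, hk5, hocc⟩
        refine ⟨xi - k, (hmem1r _).mpr ⟨by omega, by omega⟩, ?_⟩
        simp only [Bool.and_eq_true, decide_eq_true_eq]
        refine ⟨by omega, ?_⟩
        rw [show xi - k = xi + k * -1 from by ring, show yi = yi + k * 0 from by ring]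
        exact hocc
    -- direction (-1, -1): up-left
    have hdUL : rows1.any (fun x' => decide (x' < xi) && decide ((yi - xi + x') ∈ cols1)
          && pvOcc A x' (yi - xi + x'))
        = pvSeen A n m (xi + -1) (yi + -1) (-1) (-1) (n + m).toNat := by
      rw [Bool.eq_iff_iff, List.any_eq_true,
        pvSeen_iff A n m xi yi (-1) (-1) (by norm_num) (by norm_num) (by norm_num) hxi0 hxin hyi0 hyim]
      constructor
      · rintro ⟨x', hx', hpred⟩
        simp only [Bool.and_eq_true, decide_eq_true_eq] at hpred
        rw [hmem1r] at hx'
        rw [hmem1c] at hpred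
        obtain ⟨⟨hlt, hmem⟩, hocc⟩ := hpred
        refine ⟨xi - x', by omega, by omega, by omega, by omega, by omega, ?_⟩
        rw [show xi + (xi - x') * -1 = x' from by ring,
          show yi + (xi - x') * -1 = yi - xi + x' from by ring]
        exact hocc
      · rintro ⟨k, hk1, hk2, hk3, hk4, hk5, hocc⟩
        refine ⟨xi - k, (hmem1r _).mpr ⟨by omega, by omega⟩, ?_⟩
        simp only [Bool.and_eq_true, decide_eq_true_eq]
        refine ⟨⟨by omega, (hmem1c _).mpr ⟨by omega, by omega⟩⟩, ?_⟩
        rw [show yi - xi + (xi - k) = yi + k * -1 from by ring,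
          show xi - k = xi + k * -1 from by ring]
        exact hocc
    -- direction (-1, 1): up-right
    have hdUR : rows1.any (fun x' => decide (x' < xi) && decide ((yi + xi - x') ∈ cols1)
          && pvOcc A x' (yi + xi - x'))
        = pvSeen A n m (xi + -1) (yi + 1) (-1) 1 (n + m).toNat := by
      rw [Bool.eq_iff_iff, List.any_eq_true,
        pvSeen_iff A n m xi yi (-1) 1 (by norm_num) (by norm_num) (by norm_num) hxi0 hxin hyi0 hyim]
      constructor
      · rintro ⟨x', hx', hpred⟩
        simp only [Bool.and_eq_true, decide_eq_true_eq] at hpred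
        rw [hmem1r] at hx'
        rw [hmem1c] at hpred
        obtain ⟨⟨hlt, hmem⟩, hocc⟩ := hpred
        refine ⟨xi - x', by omega, by omega, by omega, by omega, by omega, ?_⟩
        rw [show xi + (xi - x') * -1 = x' from by ring,
          show yi + (xi - x') * 1 = yi + xi - x' from by ring]
        exact hocc
      · rintro ⟨k, hk1, hk2, hk3, hk4, hk5, hocc⟩
        refine ⟨xi - k, (hmem1r _).mpr ⟨by omega, by omega⟩, ?_⟩
        simp only [Bool.and_eq_true, decide_eq_true_eq]
        refine ⟨⟨by omega, (hmem1c _).mpr ⟨by omega, by omega⟩⟩, ?_⟩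
        rw [show yi + xi - (xi - k) = yi + k * 1 from by ring,
          show xi - k = xi + k * -1 from by ring]
        exact hocc
    -- direction (0, 1): right
    have hdR : cols2.any (fun y' => decide (yi < y') && pvOcc A xi y')
        = pvSeen A n m (xi + 0) (yi + 1) 0 1 (n + m).toNat := by
      rw [Bool.eq_iff_iff, List.any_eq_true,
        pvSeen_iff A n m xi yi 0 1 (by norm_num) (by norm_num) (by norm_num) hxi0 hxin hyi0 hyim]
      constructor
      · rintro ⟨y', hy', hpred⟩
        simp only [Bool.and_eq_true, decide_eq_true_eq] at hpred
        rw [hmem2c] at hy'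
        refine ⟨y' - yi, by omega, by omega, by omega, by omega, by omega, ?_⟩
        rw [show xi + (y' - yi) * 0 = xi from by ring, show yi + (y' - yi) * 1 = y' from by ring]
        exact hpred.2
      · rintro ⟨k, hk1, hk2, hk3, hk4, hk5, hocc⟩
        refine ⟨yi + k, (hmem2c _).mpr ⟨by omega, by omega⟩, ?_⟩
        simp only [Bool.and_eq_true, decide_eq_true_eq]
        refine ⟨by omega, ?_⟩
        rw [show xi = xi + k * 0 from by ring, show yi + k = yi + k * 1 from by ring]
        exact hocc
    -- direction (1, 0): down
    have hdD : rows2.any (fun x' => decide (xi < x') && pvOcc A x' yi)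
        = pvSeen A n m (xi + 1) (yi + 0) 1 0 (n + m).toNat := by
      rw [Bool.eq_iff_iff, List.any_eq_true,
        pvSeen_iff A n m xi yi 1 0 (by norm_num) (by norm_num) (by norm_num) hxi0 hxin hyi0 hyim]
      constructor
      · rintro ⟨x', hx', hpred⟩
        simp only [Bool.and_eq_true, decide_eq_true_eq] at hpred
        rw [hmem2r] at hx'
        refine ⟨x' - xi, by omega, by omega, by omega, by omega, by omega, ?_⟩
        rw [show xi + (x' - xi) * 1 = x' from by ring, show yi + (x' - xi) * 0 = yi from by ring]
        exact hpred.2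
      · rintro ⟨k, hk1, hk2, hk3, hk4, hk5, hocc⟩
        refine ⟨xi + k, (hmem2r _).mpr ⟨by omega, by omega⟩, ?_⟩
        simp only [Bool.and_eq_true, decide_eq_true_eq]
        refine ⟨by omega, ?_⟩
        rw [show xi + k = xi + k * 1 from by ring, show yi = yi + k * 0 from by ring]
        exact hocc
    -- direction (1, 1): down-right
    have hdDR : rows2.any (fun x' => decide (xi < x') && decide ((yi - xi + x') ∈ cols2)
          && pvOcc A x' (yi - xi + x'))
        = pvSeen A n m (xi + 1) (yi + 1) 1 1 (n + m).toNat := by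
      rw [Bool.eq_iff_iff, List.any_eq_true,
        pvSeen_iff A n m xi yi 1 1 (by norm_num) (by norm_num) (by norm_num) hxi0 hxin hyi0 hyim]
      constructor
      · rintro ⟨x', hx', hpred⟩
        simp only [Bool.and_eq_true, decide_eq_true_eq] at hpred
        rw [hmem2r] at hx'
        rw [hmem2c] at hpred
        obtain ⟨⟨hlt, hmem⟩, hocc⟩ := hpred
        refine ⟨x' - xi, by omega, by omega, by omega, by omega, by omega, ?_⟩
        rw [show xi + (x' - xi) * 1 = x' from by ring,
          show yi + (x' - xi) * 1 = yi - xi + x' from by ring]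
        exact hocc
      · rintro ⟨k, hk1, hk2, hk3, hk4, hk5, hocc⟩
        refine ⟨xi + k, (hmem2r _).mpr ⟨by omega, by omega⟩, ?_⟩
        simp only [Bool.and_eq_true, decide_eq_true_eq]
        refine ⟨⟨by omega, (hmem2c _).mpr ⟨by omega, by omega⟩⟩, ?_⟩
        rw [show yi - xi + (xi + k) = yi + k * 1 from by ring,
          show xi + k = xi + k * 1 from by ring]
        exact hocc
    -- direction (1, -1): down-left
    have hdDL : rows2.any (fun x' => decide (xi < x') && decide ((yi + xi - x') ∈ cols2)
          && pvOcc A x' (yi + xi - x'))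
        = pvSeen A n m (xi + 1) (yi + -1) 1 (-1) (n + m).toNat := by
      rw [Bool.eq_iff_iff, List.any_eq_true,
        pvSeen_iff A n m xi yi 1 (-1) (by norm_num) (by norm_num) (by norm_num) hxi0 hxin hyi0 hyim]
      constructor
      · rintro ⟨x', hx', hpred⟩
        simp only [Bool.and_eq_true, decide_eq_true_eq] at hpred
        rw [hmem2r] at hx'
        rw [hmem2c] at hpred
        obtain ⟨⟨hlt, hmem⟩, hocc⟩ := hpred
        refine ⟨x' - xi, by omega, by omega, by omega, by omega, by omega, ?_⟩
        rw [show xi + (x' - xi) * 1 = x' from by ring,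
          show yi + (x' - xi) * -1 = yi + xi - x' from by ring]
        exact hocc
      · rintro ⟨k, hk1, hk2, hk3, hk4, hk5, hocc⟩
        refine ⟨xi + k, (hmem2r _).mpr ⟨by omega, by omega⟩, ?_⟩
        simp only [Bool.and_eq_true, decide_eq_true_eq]
        refine ⟨⟨by omega, (hmem2c _).mpr ⟨by omega, by omega⟩⟩, ?_⟩
        rw [show yi + xi - (xi + k) = yi + k * -1 from by ring,
          show xi + k = xi + k * 1 from by ring]
        exact hocc
    rw [hdL, hdU, hdUL, hdUR, hdR, hdD, hdDR, hdDL]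
    have hIf : ∀ (b : Bool) (c : Int), (if b = true then c + 1 else c) = c + (if b = true then 1 else 0) := by
      intro b c; cases b <;> simp
    simp only [pvDirs, List.foldl_cons, List.foldl_nil, hIf]
    ring
  have hs2len : s2.res.length = n.toNat := by
    rw [Q1]
    show s1.res.length = n.toNat
    rw [P1]
    show res0.length = n.toNat
    exact hres0len
  have hs2row : ∀ x : Nat, x < n.toNat → (s2.res.getD x []).length = m.toNat := by
    intro x hx
    rw [Q2 x]
    show (s1.res.getD x []).length = m.toNat
    rw [P2 x]
    show (res0.getD x []).length = m.toNat
    rw [hres0row x hx, hrow0len]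
  have hQA : queenAttack A = s2.res := rfl
  have hQB : queenAttack_alt A = (PySem.List.pyRange 0 n 1).map (fun i =>
      (PySem.List.pyRange 0 m 1).map (fun j =>
        pvDirs.foldl (fun c d =>
          if pvSeen A n m (i + d.1) (j + d.2) d.1 d.2 (n + m).toNat = true then c + 1 else c) 0)) := rfl
  rw [hQA, hQB]
  apply List.ext_getElem
  · rw [hs2len]
    simp [PySem.List.length_pyRange_one]
  intro x h1 h2
  have hxn : x < n.toNat := by rw [← hs2len]; exact h1
  rw [List.getElem_map, PySem.List.getElem_pyRange_one]
  have hrowx : s2.res[x] = s2.res.getD x [] := (List.getD_eq_getElem _ _ h1).symm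
  apply List.ext_getElem
  · rw [hrowx, hs2row x hxn]
    simp [PySem.List.length_pyRange_one]
  intro y hy1 hy2
  have hym : y < m.toNat := by
    rw [hrowx, hs2row x hxn] at hy1
    exact hy1
  rw [List.getElem_map, PySem.List.getElem_pyRange_one]
  have hLHS : s2.res[x][y] = pvGetM s2.res x y := by
    unfold pvGetM
    rw [List.getD_eq_getElem _ _ h1, List.getD_eq_getElem]
  have hx0 : (0 : Int) + (x : Int) = ((x : Int)) := by ring
  have hy0 : (0 : Int) + (y : Int) = ((y : Int)) := by ring
  rw [hLHS, hx0, hy0]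
  have := hfinal (x : Int) (y : Int) (by positivity) (by omega) (by positivity) (by omega)
  simpa using this
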